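-- pv_equiv track=rewrite | github.com/Apersant1/Algorithms-for-EGE | task22.py | f
-- ===== SOURCE A (Python) =====
-- def f(x):
--     L = 0
--     M = 0
--     while x > 0 :
--         L = L+1
--         if (x % 2) != 0:
--             M = M + x % 8
--         x = x // 8
--     return (L,M)
-- ===== SOURCE B (Python) =====
-- def f(x):
--     if x <= 0:
--         return (0, 0)
--     s = oct(x)[2:]
--     return (len(s), sum(int(d) for d in s if int(d) % 2 == 1))
-- ===== Notes on version B (the rewrite author's own statement) =====
-- stated objective: idiomatic
-- what changed: B builds the octal string with oct(x) and takes its length and the sum of its odd digits, instead of peeling octal digits arithmetically (floor division and remainder) in a while loop.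
import Mathlib
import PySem

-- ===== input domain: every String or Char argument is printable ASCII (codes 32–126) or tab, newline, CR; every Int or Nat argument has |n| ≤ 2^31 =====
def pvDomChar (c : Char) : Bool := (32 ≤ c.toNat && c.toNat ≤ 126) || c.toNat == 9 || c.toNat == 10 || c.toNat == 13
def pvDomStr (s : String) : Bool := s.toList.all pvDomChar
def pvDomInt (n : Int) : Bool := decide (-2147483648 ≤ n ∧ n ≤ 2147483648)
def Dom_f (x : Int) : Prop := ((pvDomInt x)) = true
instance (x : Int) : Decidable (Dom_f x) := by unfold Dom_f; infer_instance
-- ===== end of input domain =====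

-- B computes (count, odd-digit sum) from the octal string oct(x) instead of peeling octal digits arithmetically in a loop.


-- ===== PORT A =====
-- the while loop of A, state (x, L, M)
def fLoop (x L M : Int) : Int × Int :=
  if _h : x > 0 then
    fLoop (PySem.Int.floordiv x 8)
      (L + 1)
      (if PySem.Int.mod x 2 ≠ 0 then M + PySem.Int.mod x 8 else M)
  else (L, M)
termination_by x.toNat
decreasing_by
  have := PySem.Int.floordiv_eq_ediv_of_pos (a := x) (b := 8) (by omega)
  rw [this]; omega

def f (x : Int) : Int × Int := fLoop x 0 0

-- ===== PORT B =====
-- digits of oct(x) (most significant first), as Ints; exact port of oct(x)[2:] + int(d) for x > 0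
def octDigits (x : Int) : List Int :=
  if _h : x > 0 then octDigits (PySem.Int.floordiv x 8) ++ [PySem.Int.mod x 8]
  else []
termination_by x.toNat
decreasing_by
  have := PySem.Int.floordiv_eq_ediv_of_pos (a := x) (b := 8) (by omega)
  rw [this]; omega

def f_alt (x : Int) : Int × Int :=
  if x ≤ 0 then (0, 0)
  else
    let s := octDigits x
    ((s.length : Int), ((s.filter (fun d => PySem.Int.mod d 2 = 1)).sum))

-- ===== PRECONDITION & SPEC =====
def Spec_f (x : Int) (out : Int × Int) : Prop := out = f_alt x
instance (x : Int) (out : Int × Int) : Decidable (Spec_f x out) := by unfold Spec_f; infer_instance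

-- ===== CLAIM (what is proved, stated in full; the proofs are below) =====
def Claim_equal_f : Prop := ∀ (x : Int), Dom_f x → Spec_f x (f x)

-- ===== LEMMAS AND PROOFS =====
lemma fLoop_eq (n : Nat) : ∀ (x L M : Int), x.toNat = n →
    fLoop x L M =
      (L + ((octDigits x).length : Int),
       M + ((octDigits x).filter (fun d => PySem.Int.mod d 2 = 1)).sum) := by
  induction n using Nat.strong_induction_on with
  | _ n ih =>
    intro x L M hn
    rw [fLoop, octDigits]
    by_cases h : x > 0
    · simp only [h, dif_pos]
      have hfd := PySem.Int.floordiv_eq_ediv_of_pos (a := x) (b := 8) (by omega)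
      have hm8 := PySem.Int.mod_eq_emod_of_pos (a := x) (b := 8) (by omega)
      have hm2 := PySem.Int.mod_eq_emod_of_pos (a := x) (b := 2) (by omega)
      have hrec : ∀ L' M' : Int, fLoop (PySem.Int.floordiv x 8) L' M' =
          (L' + ((octDigits (PySem.Int.floordiv x 8)).length : Int),
           M' + ((octDigits (PySem.Int.floordiv x 8)).filter
                  (fun d => PySem.Int.mod d 2 = 1)).sum) :=
        fun L' M' => ih (PySem.Int.floordiv x 8).toNat
          (by rw [hfd]; omega) (PySem.Int.floordiv x 8) L' M' rfl
      rw [hrec]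
      have hmm : PySem.Int.mod (PySem.Int.mod x 8) 2 = (x % 8) % 2 := by
        rw [hm8, PySem.Int.mod_eq_emod_of_pos (a := x % 8) (b := 2) (by omega)]
      by_cases hodd : PySem.Int.mod x 2 ≠ 0
      · have hfil : List.filter (fun d => decide (PySem.Int.mod d 2 = 1))
            [PySem.Int.mod x 8] = [PySem.Int.mod x 8] := by
          rw [List.filter_singleton, hmm]
          have h1 : x % 8 % 2 = 1 := by rw [hm2] at hodd; omega
          simp [h1]
        rw [if_pos hodd]
        simp only [List.filter_append, hfil, List.length_append, List.sum_append,
          List.length_singleton, List.sum_singleton]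
        refine Prod.ext ?_ ?_ <;> push_cast <;> ring
      · have hfil : List.filter (fun d => decide (PySem.Int.mod d 2 = 1))
            [PySem.Int.mod x 8] = [] := by
          rw [List.filter_singleton, hmm]
          have h1 : ¬ x % 2 = 1 := by rw [hm2] at hodd; omega
          simp [h1]
        rw [if_neg hodd]
        simp only [List.filter_append, hfil, List.length_append, List.sum_append,
          List.length_singleton, List.sum_nil, add_zero]
        refine Prod.ext ?_ ?_ <;> push_cast <;> ring
    · simp [h]

-- ===== VERDICT (by name: the statement is the Claim_ definition above) =====
theorem f_spec : Claim_equal_f := by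
  intro x _
  unfold Spec_f f f_alt
  rw [fLoop_eq x.toNat x 0 0 rfl]
  by_cases h : x ≤ 0
  · rw [octDigits]; simp [h, show ¬ x > 0 by omega]
  · simp [h]
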